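-- pv_equiv track=rewrite | github.com/antoine-gajan/UTC-INF2 | TD2/Exercice 3 - Carré magique.py | carre_magique_normal
-- ===== SOURCE A (Python) =====
-- def carre_magique_normal(mat_c):
--     i = 0
--     l = [i for i in range(1, len(mat_c)**2 + 1)]
--     normal = True
--     while i < (len(mat_c)) and normal:
--         j = 0
--         while j < (len(mat_c)) and normal:
--             if (mat_c[i][j] < 1) or (mat_c[i][j] > len(mat_c)**2):
--                 normal = False
--             else:
--                 if mat_c[i][j] in l:
--                     l.remove(mat_c[i][j])
--                     j += 1
--                 else:
--                     normal = False
--         i += 1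
--     if len(l) == 0:
--         return True
--     return False
-- ===== SOURCE B (Python) =====
-- def carre_magique_normal(mat_c):
--     n = len(mat_c)
--     return sorted(v for row in mat_c for v in row[:n]) == list(range(1, n * n + 1))
-- ===== Notes on version B (the rewrite author's own statement) =====
-- stated objective: alternative
-- what changed: Replaces A's cell-by-cell range test plus membership-and-remove on a shrinking list of required values by a sort-then-compare: collect the first n entries of each row, sort them, and compare with the sequence 1..n^2; no per-cell checks, no marking, no early exit (O(n^2 log n) vs A's O(n^4) worst case, but A aborts at the first bad cell on typical random inputs, so no speed claim is made).
import Mathlib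
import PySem

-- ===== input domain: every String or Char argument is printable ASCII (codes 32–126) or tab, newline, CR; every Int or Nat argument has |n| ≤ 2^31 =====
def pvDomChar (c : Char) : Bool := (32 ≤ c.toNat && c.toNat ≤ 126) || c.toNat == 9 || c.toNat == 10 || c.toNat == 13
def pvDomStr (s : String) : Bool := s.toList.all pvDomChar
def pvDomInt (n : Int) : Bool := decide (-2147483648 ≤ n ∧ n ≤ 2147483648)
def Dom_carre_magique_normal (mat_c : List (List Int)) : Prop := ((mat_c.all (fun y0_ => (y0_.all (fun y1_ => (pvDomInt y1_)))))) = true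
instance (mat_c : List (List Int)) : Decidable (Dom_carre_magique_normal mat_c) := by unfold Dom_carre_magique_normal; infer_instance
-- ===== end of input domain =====

-- B replaces A's cell-by-cell range test plus membership-and-remove on a shrinking list of
-- required values by sort-then-compare: sort the scanned entries and compare with 1..n².

-- ===== PORT A =====
-- inner while loop: `while j < n and normal`; setting normal = False immediately ends both loops,
-- so it is transcribed as returning (l, false).  mat_c[i][j] is pyGet? with a default that is
-- never used on inputs where Python does not raise (Pre_ excludes exactly the raising inputs).
def pyAInner (mat : List (List Int)) (n : Nat) (nsq : Int) (i : Nat) (j : Nat) (l : List Int) :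
    List Int × Bool :=
  if _h : j < n then
    if (PySem.List.pyGet? ((PySem.List.pyGet? mat (i : Int)).getD []) (j : Int)).getD 0 < 1 ∨
        (PySem.List.pyGet? ((PySem.List.pyGet? mat (i : Int)).getD []) (j : Int)).getD 0 > nsq then
      (l, false)
    else if (PySem.List.pyGet? ((PySem.List.pyGet? mat (i : Int)).getD []) (j : Int)).getD 0 ∈ l then
      pyAInner mat n nsq i (j + 1)
        ((PySem.List.remove? l
          ((PySem.List.pyGet? ((PySem.List.pyGet? mat (i : Int)).getD []) (j : Int)).getD 0)).getD l)
    else (l, false)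
  else (l, true)
termination_by n - j

-- outer while loop: `while i < n and normal`
def pyAOuter (mat : List (List Int)) (n : Nat) (nsq : Int) (i : Nat) (l : List Int) :
    List Int × Bool :=
  if _h : i < n then
    match pyAInner mat n nsq i 0 l with
    | (l', true) => pyAOuter mat n nsq (i + 1) l'
    | (l', false) => (l', false)
  else (l, true)
termination_by n - i

def carre_magique_normal (mat_c : List (List Int)) : Bool :=
  let n := mat_c.length
  let l := PySem.List.pyRange 1 ((n : Int) ^ 2 + 1) 1
  ((pyAOuter mat_c n ((n : Int) ^ 2) 0 l).1.length == 0)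

-- ===== PORT B =====
-- `sorted(v for row in mat_c for v in row[:n]) == list(range(1, n*n+1))`;
-- the generator flattening is flatMap, and `row[:n]` with n = len(mat_c) ≥ 0 is exactly take n.
def carre_magique_normal_alt (mat_c : List (List Int)) : Bool :=
  let n := mat_c.length
  PySem.List.sorted (mat_c.flatMap (fun row => row.take n)) (fun x => x) false
    == PySem.List.pyRange 1 ((n : Int) * (n : Int) + 1) 1

-- ===== PRECONDITION & SPEC =====
-- Pre_ excludes exactly the inputs on which Python A raises IndexError: those matrices with a row i
-- shorter than n = len(mat_c) such that the row-major scan actually reaches the end of row i, i.e.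
-- all rows before i have length ≥ n and every entry scanned before that point is in [1, n²] and
-- distinct from the earlier ones (otherwise the scan stops first and A returns).
def Pre_carre_magique_normal (mat_c : List (List Int)) : Prop :=
  ¬ ∃ i ∈ List.range mat_c.length,
      (mat_c.getD i []).length < mat_c.length ∧
      (∀ i' ∈ List.range i, mat_c.length ≤ (mat_c.getD i' []).length) ∧
      (((List.range i).map (fun k => (mat_c.getD k []).take mat_c.length)).flatten
          ++ mat_c.getD i []).Nodup ∧
      (∀ v ∈ ((List.range i).map (fun k => (mat_c.getD k []).take mat_c.length)).flatten
          ++ mat_c.getD i [], 1 ≤ v ∧ v ≤ (mat_c.length : Int) * (mat_c.length : Int))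
instance (mat_c : List (List Int)) : Decidable (Pre_carre_magique_normal mat_c) := by
  unfold Pre_carre_magique_normal; infer_instance

def pvWitness_carre_magique_normal : List (List Int) := [[2, 3], [4, 1]]

def Spec_carre_magique_normal (mat_c : List (List Int)) (out : Bool) : Prop := out = carre_magique_normal_alt mat_c
instance (mat_c : List (List Int)) (out : Bool) : Decidable (Spec_carre_magique_normal mat_c out) := by unfold Spec_carre_magique_normal; infer_instance

-- ===== CLAIM (what is proved, stated in full; the proofs are below) =====
def Claim_equal_carre_magique_normal : Prop := ∀ (mat_c : List (List Int)), Dom_carre_magique_normal mat_c → Pre_carre_magique_normal mat_c → Spec_carre_magique_normal mat_c (carre_magique_normal mat_c)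

-- ===== LEMMAS AND PROOFS =====

-- A's row padded with zeros up to length n: the value pyAInner reads at column j is
-- (padRow n row)[j]; a padding 0 is read exactly where Python raises (excluded by Pre_),
-- and 0 < 1 aborts the scan there.
def padRow (n : Nat) (r : List Int) : List Int := r.take n ++ List.replicate (n - r.length) 0

-- A's two while loops as one left-to-right pass over a value list
def procA (nsq : Int) : List Int → List Int → List Int × Bool
  | [], l => (l, true)
  | v :: vs, l =>
    if v < 1 ∨ v > nsq then (l, false)
    else if v ∈ l then procA nsq vs ((PySem.List.remove? l v).getD l)
    else (l, false)

theorem procA_append_true (nsq : Int) (xs : List Int) : ∀ (ys l : List Int),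
    (procA nsq xs l).2 = true → procA nsq (xs ++ ys) l = procA nsq ys (procA nsq xs l).1 := by
  induction xs with
  | nil => intro ys l _; simp [procA]
  | cons v vs ih =>
    intro ys l h
    rw [List.cons_append]
    by_cases h1 : v < 1 ∨ v > nsq
    · simp only [procA, if_pos h1] at h
      simp at h
    · by_cases h2 : v ∈ l
      · simp only [procA, if_neg h1, if_pos h2] at h ⊢
        exact ih ys _ h
      · simp only [procA, if_neg h1, if_neg h2] at h
        simp at h

theorem procA_append_false (nsq : Int) (xs : List Int) : ∀ (ys l : List Int),
    (procA nsq xs l).2 = false → procA nsq (xs ++ ys) l = procA nsq xs l := by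
  induction xs with
  | nil => intro ys l h; simp [procA] at h
  | cons v vs ih =>
    intro ys l h
    rw [List.cons_append]
    by_cases h1 : v < 1 ∨ v > nsq
    · simp only [procA, if_pos h1]
    · by_cases h2 : v ∈ l
      · simp only [procA, if_neg h1, if_pos h2] at h ⊢
        exact ih ys _ h
      · simp only [procA, if_neg h1, if_neg h2]

theorem length_padRow (n : Nat) (r : List Int) : (padRow n r).length = n := by
  simp [padRow]
  omega

theorem getD_padRow (n : Nat) (r : List Int) (j : Nat) (h : j < n) :
    (padRow n r).getD j 0 = r.getD j 0 := by
  by_cases hj : j < r.length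
  · rw [List.getD_eq_getElem?_getD, List.getD_eq_getElem?_getD, padRow,
      List.getElem?_append_left (by rw [List.length_take]; omega),
      List.getElem?_take_of_lt h]
  · rw [List.getD_eq_getElem?_getD, List.getD_eq_getElem?_getD, padRow,
      List.getElem?_append_right (by rw [List.length_take]; omega),
      List.getElem?_replicate,
      if_pos (by rw [List.length_take]; omega),
      List.getElem?_eq_none (by omega)]
    rfl

theorem pyAInner_eq (mat : List (List Int)) (n : Nat) (nsq : Int) (i : Nat) :
    ∀ (m j : Nat) (l : List Int), n - j = m →
      pyAInner mat n nsq i j l =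
        procA nsq ((padRow n ((PySem.List.pyGet? mat (i : Int)).getD [])).drop j) l := by
  intro m
  induction m with
  | zero =>
    intro j l hm
    rw [pyAInner, dif_neg (by omega)]
    rw [List.drop_eq_nil_of_le (by rw [length_padRow]; omega)]
    rfl
  | succ m ih =>
    intro j l hm
    have hj : j < n := by omega
    have hlen : j < (padRow n ((PySem.List.pyGet? mat (i : Int)).getD [])).length := by
      rw [length_padRow]; omega
    rw [pyAInner, dif_pos hj]
    rw [List.drop_eq_getElem_cons hlen]
    have hv : (padRow n ((PySem.List.pyGet? mat (i : Int)).getD []))[j]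
        = (PySem.List.pyGet? ((PySem.List.pyGet? mat (i : Int)).getD []) (j : Int)).getD 0 := by
      calc (padRow n ((PySem.List.pyGet? mat (i : Int)).getD []))[j]
          = (padRow n ((PySem.List.pyGet? mat (i : Int)).getD [])).getD j 0 :=
            (List.getD_eq_getElem _ _ hlen).symm
        _ = ((PySem.List.pyGet? mat (i : Int)).getD []).getD j 0 := getD_padRow _ _ _ hj
        _ = (((PySem.List.pyGet? mat (i : Int)).getD [])[j]?).getD 0 :=
            List.getD_eq_getElem?_getD
        _ = (PySem.List.pyGet? ((PySem.List.pyGet? mat (i : Int)).getD []) (j : Int)).getD 0 := by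
            simp [PySem.List.pyGet?_natCast]
    simp only [procA]
    rw [hv]
    split_ifs with h1 h2
    · rfl
    · exact ih (j + 1) _ (by omega)
    · rfl

theorem pyAOuter_eq (mat : List (List Int)) (n : Nat) (nsq : Int) (hn : n = mat.length) :
    ∀ (m i : Nat) (l : List Int), n - i = m →
      pyAOuter mat n nsq i l = procA nsq (((mat.drop i).map (padRow n)).flatten) l := by
  intro m
  induction m with
  | zero =>
    intro i l hm
    rw [pyAOuter, dif_neg (by omega)]
    rw [List.drop_eq_nil_of_le (by omega)]
    rfl
  | succ m ih =>
    intro i l hm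
    have hi : i < n := by omega
    have hidx : i < mat.length := by omega
    rw [pyAOuter, dif_pos hi]
    rw [List.drop_eq_getElem_cons hidx]
    simp only [List.map_cons, List.flatten_cons]
    have hrow : (PySem.List.pyGet? mat (i : Int)).getD [] = mat[i] := by
      rw [PySem.List.pyGet?_natCast, List.getElem?_eq_getElem hidx]
      rfl
    rw [pyAInner_eq mat n nsq i n 0 l (by omega)]
    rw [List.drop_zero, hrow]
    rcases hres : procA nsq (padRow n mat[i]) l with ⟨l', b⟩
    cases b
    · rw [procA_append_false nsq _ _ l (by rw [hres])]
      rw [hres]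
    · rw [procA_append_true nsq _ _ l (by rw [hres])]
      rw [hres]
      exact ih (i + 1) l' (by omega)

-- success: a nodup, in-range, in-l value list is fully consumed, removing one element per value
theorem procA_success (nsq : Int) (xs : List Int) : ∀ (l : List Int),
    xs.Nodup → (∀ x ∈ xs, x ∈ l) → (∀ x ∈ xs, 1 ≤ x ∧ x ≤ nsq) →
    ∃ l', procA nsq xs l = (l', true) ∧ l'.length + xs.length = l.length := by
  induction xs with
  | nil => intro l _ _ _; exact ⟨l, rfl, by simp⟩
  | cons v vs ih =>
    intro l hnd hmem hrng
    have hv : v ∈ l := hmem v List.mem_cons_self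
    have hr := hrng v List.mem_cons_self
    have hnd' : vs.Nodup := hnd.of_cons
    have hvn : v ∉ vs := (List.nodup_cons.mp hnd).1
    obtain ⟨l', h1, h2⟩ := ih (l.erase v) hnd'
      (fun x hx => (List.mem_erase_of_ne (by rintro rfl; exact hvn hx)).mpr
        (hmem x (List.mem_cons_of_mem _ hx)))
      (fun x hx => hrng x (List.mem_cons_of_mem _ hx))
    refine ⟨l', ?_, ?_⟩
    · simp only [procA]
      rw [if_neg (by omega), if_pos hv, PySem.List.remove?_eq_some_erase _ _ hv,
        Option.getD_some]
      exact h1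
    · have h3 := List.length_erase_of_mem hv
      have h4 : 1 ≤ l.length := List.length_pos_of_mem hv
      simp only [List.length_cons]
      omega

-- failure: if the value list is not a nodup in-range sublist of (nodup) l, the scan aborts
-- keeping strictly more of l than a full consumption would
theorem procA_fail (nsq : Int) (xs : List Int) : ∀ (l : List Int), l.Nodup →
    ¬(xs.Nodup ∧ ∀ x ∈ xs, x ∈ l ∧ 1 ≤ x ∧ x ≤ nsq) →
    ∃ l', procA nsq xs l = (l', false) ∧ l.length < l'.length + xs.length := by
  induction xs with
  | nil => intro l _ h; exact absurd ⟨List.nodup_nil, by simp⟩ h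
  | cons v vs ih =>
    intro l hl h
    by_cases h1 : v < 1 ∨ v > nsq
    · refine ⟨l, ?_, by simp only [List.length_cons]; omega⟩
      simp only [procA]
      rw [if_pos h1]
    · by_cases h2 : v ∈ l
      · have hfail : ¬(vs.Nodup ∧ ∀ x ∈ vs, x ∈ l.erase v ∧ 1 ≤ x ∧ x ≤ nsq) := by
          intro ⟨hnd, hall⟩
          apply h
          constructor
          · rw [List.nodup_cons]
            refine ⟨?_, hnd⟩
            intro hvv
            exact hl.not_mem_erase (hall v hvv).1
          · intro x hx
            rcases List.mem_cons.mp hx with rfl | hx'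
            · exact ⟨h2, by omega, by omega⟩
            · obtain ⟨hm, hlo, hhi⟩ := hall x hx'
              exact ⟨List.erase_subset hm, hlo, hhi⟩
        obtain ⟨l', hA, hlen⟩ := ih (l.erase v) (hl.erase v) hfail
        refine ⟨l', ?_, ?_⟩
        · simp only [procA]
          rw [if_neg h1, if_pos h2, PySem.List.remove?_eq_some_erase _ _ h2,
            Option.getD_some]
          exact hA
        · have h3 := List.length_erase_of_mem h2
          have h4 : 1 ≤ l.length := List.length_pos_of_mem h2
          simp only [List.length_cons]
          omega
      · refine ⟨l, ?_, by simp only [List.length_cons]; omega⟩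
        simp only [procA]
        rw [if_neg h1, if_neg h2]

theorem flatMap_take_length_le (n : Nat) (rows : List (List Int)) :
    (rows.flatMap (fun r => r.take n)).length ≤ n * rows.length := by
  induction rows with
  | nil => simp
  | cons r rs ih =>
    simp only [List.flatMap_cons, List.length_append, List.length_take, List.length_cons]
    have : min n r.length ≤ n := min_le_left _ _
    calc min n r.length + (rs.flatMap (fun r => r.take n)).length
        ≤ n + n * rs.length := Nat.add_le_add this ih
      _ = n * (rs.length + 1) := by ring

theorem rows_long_of_flatMap_length (n : Nat) (rows : List (List Int)) :
    (rows.flatMap (fun r => r.take n)).length = n * rows.length →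
    ∀ r ∈ rows, n ≤ r.length := by
  induction rows with
  | nil => intro _ r hr; simp at hr
  | cons r rs ih =>
    intro h r' hr'
    simp only [List.flatMap_cons, List.length_append, List.length_take, List.length_cons] at h
    rw [Nat.mul_add, Nat.mul_one] at h
    have h1 : min n r.length ≤ n := min_le_left _ _
    have h2 := flatMap_take_length_le n rs
    have hmin : min n r.length = n := by omega
    have hrest : (rs.flatMap (fun r => r.take n)).length = n * rs.length := by omega
    rcases List.mem_cons.mp hr' with rfl | hr''
    · omega
    · exact ih hrest r' hr''

-- when every row has length ≥ n, the zero-padded rows are exactly the truncated rows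
theorem padded_eq_flatMap_of_long (n : Nat) (rows : List (List Int))
    (h : ∀ r ∈ rows, n ≤ r.length) :
    ((rows.map (padRow n)).flatten) = rows.flatMap (fun r => r.take n) := by
  rw [List.flatMap_def]
  congr 1
  exact List.map_congr_left fun r hr => by
    simp [padRow, Nat.sub_eq_zero_of_le (h r hr)]

-- A returns true iff the scanned values (first n of each row) are a permutation of 1..n²
theorem A_true_iff (mat : List (List Int)) :
    carre_magique_normal mat = true ↔
      (mat.flatMap (fun r => r.take mat.length)).Perm
        (PySem.List.pyRange 1 (((mat.length * mat.length : Nat) : Int) + 1) 1) := by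
  set n := mat.length with hn
  set nsq : Int := ((n * n : Nat) : Int) with hnsq
  set R := PySem.List.pyRange 1 (nsq + 1) 1 with hR
  have hcast : ((n : Int)) ^ 2 = nsq := by rw [hnsq]; push_cast; ring
  have hRlen : R.length = n * n := by
    rw [hR, PySem.List.length_pyRange_one]; omega
  have hRmem : ∀ x, x ∈ R ↔ 1 ≤ x ∧ x ≤ nsq := by
    intro x
    rw [hR, PySem.List.mem_pyRange_one]
    omega
  have hRnd : R.Nodup := PySem.List.nodup_pyRange_one 1 (nsq + 1)
  have hAdef : carre_magique_normal mat = ((procA nsq ((mat.map (padRow n)).flatten) R).1.length == 0) := by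
    show ((pyAOuter mat n ((n : Int) ^ 2) 0 (PySem.List.pyRange 1 ((n : Int) ^ 2 + 1) 1)).1.length == 0) = _
    rw [hcast, pyAOuter_eq mat n nsq hn n 0 _ (by omega), List.drop_zero]
  set padded := (mat.map (padRow n)).flatten with hpadded
  have hplen : padded.length = n * n := by
    rw [hpadded, List.length_flatten, List.map_map]
    have : (List.map (List.length ∘ padRow n) mat) = List.map (fun _ => n) mat :=
      List.map_congr_left fun r _ => length_padRow n r
    rw [this, List.map_const', List.sum_replicate, smul_eq_mul, hn]
  set taken := mat.flatMap (fun r => r.take n) with htaken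
  by_cases hC : padded.Nodup ∧ ∀ x ∈ padded, 1 ≤ x ∧ x ≤ nsq
  · obtain ⟨hnd, hrng⟩ := hC
    have hmem : ∀ x ∈ padded, x ∈ R := fun x hx => (hRmem x).mpr (hrng x hx)
    obtain ⟨l', h1, h2⟩ := procA_success nsq padded R hnd hmem hrng
    have hA : carre_magique_normal mat = true := by
      rw [hAdef, h1]
      have : l'.length = 0 := by omega
      simp [this]
    have hperm : padded.Perm R := by
      have hsp : padded.Subperm R := (List.subperm_of_subset hnd hmem)
      exact hsp.perm_of_length_le (by omega)
    have hlong : ∀ r ∈ mat, n ≤ r.length := by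
      intro r hr
      by_contra hshort
      have h0 : (0 : Int) ∈ padded := by
        rw [hpadded, List.mem_flatten]
        refine ⟨padRow n r, List.mem_map_of_mem hr, ?_⟩
        rw [padRow]
        refine List.mem_append_right _ ?_
        rw [List.mem_replicate]
        omega
      have := hrng 0 h0
      omega
    have hpt : padded = taken := by
      rw [hpadded, htaken]
      exact padded_eq_flatMap_of_long n mat hlong
    constructor
    · intro _
      rw [← hpt]
      exact hperm
    · intro _
      exact hA
  · obtain ⟨l', h1, h2⟩ := procA_fail nsq padded R hRnd
      (by
        intro ⟨ha, hb⟩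
        exact hC ⟨ha, fun x hx => ((hRmem x).mp (hb x hx).1)⟩)
    have hA : carre_magique_normal mat = false := by
      have hpos : 0 < l'.length := by
        have hx := hRlen
        have hy := hplen
        omega
      rw [hAdef, h1]
      simp [Nat.pos_iff_ne_zero.mp hpos]
    constructor
    · intro htrue
      rw [hA] at htrue
      exact absurd htrue (by simp)
    intro hperm
    exfalso
    apply hC
    have htlen : taken.length = n * n := by rw [hperm.length_eq, hRlen]
    have hlong : ∀ r ∈ mat, n ≤ r.length :=
      rows_long_of_flatMap_length n mat (by rw [← htaken, htlen, hn])
    have hpt : padded = taken := by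
      rw [hpadded, htaken]
      exact padded_eq_flatMap_of_long n mat hlong
    rw [hpt]
    refine ⟨hperm.nodup_iff.mpr hRnd, ?_⟩
    intro x hx
    exact (hRmem x).mp (hperm.subset hx)

theorem B_true_iff (mat : List (List Int)) :
    carre_magique_normal_alt mat = true ↔
      (mat.flatMap (fun r => r.take mat.length)).Perm
        (PySem.List.pyRange 1 (((mat.length * mat.length : Nat) : Int) + 1) 1) := by
  have hcast : ((mat.length : Int)) * (mat.length : Int) = ((mat.length * mat.length : Nat) : Int) := by
    push_cast; ring
  show (PySem.List.sorted (mat.flatMap (fun r => r.take mat.length)) (fun x => x) false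
      == PySem.List.pyRange 1 ((mat.length : Int) * (mat.length : Int) + 1) 1) = true ↔ _
  rw [hcast, beq_iff_eq]
  constructor
  · intro h
    have := PySem.List.sorted_perm
      (xs := mat.flatMap (fun r => r.take mat.length)) (key := fun x => x) (rev := false)
    rw [h] at this
    exact this.symm
  · intro hperm
    exact PySem.List.sorted_eq_of_perm_of_pairwise_lt _ _ _ hperm.symm
      (PySem.List.pairwise_lt_pyRange_one 1 _)

theorem ports_eq (mat_c : List (List Int)) :
    carre_magique_normal mat_c = carre_magique_normal_alt mat_c := by
  rw [Bool.eq_iff_iff, A_true_iff, B_true_iff]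

-- ===== VERDICT (by name: the statement is the Claim_ definition above) =====
theorem carre_magique_normal_spec : Claim_equal_carre_magique_normal := by
  intro mat _ _
  unfold Spec_carre_magique_normal
  exact ports_eq mat
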